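-- pv_equiv track=rewrite | github.com/Soyeonjeong94/pdf_to_questions | Desktop/python_project/pdf_to_questions/pdf_to_questions_github/pdf_to_questions_v260423.py | detect_runs
-- ===== SOURCE A (Python) =====
-- def detect_runs(positions):
--     """
--     페이지 순서 positions에서 연속 증가 시퀀스(런)를 감지.
--     번호가 이전보다 작아질 때 새 런(=새 단원)으로 분리.
--     반환: list of position-lists (각 런별 positions)
--     """
--     if not positions:
--         return []
--     runs, current = [], [positions[0]]
--     for pos in positions[1:]:
--         if pos[0] > current[-1][0]:
--             current.append(pos)
--         else:
--             runs.append(current)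
--             current = [pos]
--     runs.append(current)
--     return runs
-- ===== SOURCE B (Python) =====
-- def detect_runs(positions):
--     """
--     페이지 순서 positions에서 연속 증가 시퀀스(런)를 감지.
--     번호가 이전보다 작아질 때 새 런(=새 단원)으로 분리.
--     반환: list of position-lists (각 런별 positions)
--     """
--     if not positions:
--         return []
--     n = len(positions)
--     breaks = [i for i in range(1, n) if positions[i][0] <= positions[i - 1][0]]
--     bounds = [0] + breaks + [n]
--     return [positions[a:b] for a, b in zip(bounds, bounds[1:])]
-- ===== Notes on version B (the rewrite author's own statement) =====
-- stated objective: alternative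
-- what changed: B replaces A's single-pass accumulator loop (growing a 'current' run and flushing it on each descent) by a two-phase decomposition: first collect all boundary indices where positions[i][0] <= positions[i-1][0], then materialize the runs by slicing positions between successive bounds.
import Mathlib
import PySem

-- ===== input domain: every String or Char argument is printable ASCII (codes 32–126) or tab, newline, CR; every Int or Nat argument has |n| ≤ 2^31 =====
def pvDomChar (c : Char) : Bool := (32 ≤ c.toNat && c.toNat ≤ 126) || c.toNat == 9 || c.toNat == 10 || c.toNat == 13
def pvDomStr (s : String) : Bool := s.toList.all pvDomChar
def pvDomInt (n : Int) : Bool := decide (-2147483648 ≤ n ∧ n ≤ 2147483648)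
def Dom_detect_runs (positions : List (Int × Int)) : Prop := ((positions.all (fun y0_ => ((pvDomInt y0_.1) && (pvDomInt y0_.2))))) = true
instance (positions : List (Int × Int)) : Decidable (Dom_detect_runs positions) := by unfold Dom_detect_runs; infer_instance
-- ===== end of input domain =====

-- B replaces A's grow-a-current-run accumulator loop by a two-phase decomposition
-- (collect boundary indices, then slice between successive bounds); objective: alternative.

-- ===== PORT A =====
-- A's loop over positions[1:] with state (runs, current); current[-1] is the getLast?.
def goA (runs : List (List (Int × Int))) (current : List (Int × Int)) :
    List (Int × Int) → List (List (Int × Int))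
  | [] => runs ++ [current]
  | pos :: rest =>
    if pos.1 > ((current.getLast?).getD (0, 0)).1 then
      goA runs (current ++ [pos]) rest
    else
      goA (runs ++ [current]) [pos] rest

def detect_runs (positions : List (Int × Int)) : List (List (Int × Int)) :=
  match positions with
  | [] => []
  | p :: rest => goA [] [p] rest

-- ===== PORT B =====
def detect_runs_alt (positions : List (Int × Int)) : List (List (Int × Int)) :=
  if positions = [] then []
  else
    let n : Int := (positions.length : Int)
    let breaks : List Int := (PySem.List.pyRange 1 n 1).filter (fun i =>
      (PySem.List.pyGetD positions i (0, 0)).1 ≤ (PySem.List.pyGetD positions (i - 1) (0, 0)).1)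
    let bounds : List Int := 0 :: breaks ++ [n]
    (bounds.zip (PySem.List.slice bounds (some 1) none)).map
      (fun ab => PySem.List.slice positions (some ab.1) (some ab.2))

-- ===== PRECONDITION & SPEC =====
def Spec_detect_runs (positions : List (Int × Int)) (out : List (List (Int × Int))) : Prop := out = detect_runs_alt positions
instance (positions : List (Int × Int)) (out : List (List (Int × Int))) : Decidable (Spec_detect_runs positions out) := by unfold Spec_detect_runs; infer_instance

-- ===== CLAIM (what is proved, stated in full; the proofs are below) =====
def Claim_equal_detect_runs : Prop := ∀ (positions : List (Int × Int)), Dom_detect_runs positions → Spec_detect_runs positions (detect_runs positions)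

-- ===== LEMMAS AND PROOFS =====

-- canonical recursive form both ports are reduced to
def consHead (p : Int × Int) (ls : List (List (Int × Int))) : List (List (Int × Int)) :=
  match ls with
  | (x :: xs) :: r => (p :: x :: xs) :: r
  | _ => [p] :: ls

def runsOf : List (Int × Int) → List (List (Int × Int))
  | [] => []
  | [p] => [[p]]
  | p :: q :: rest =>
    if p.1 < q.1 then consHead p (runsOf (q :: rest)) else [p] :: runsOf (q :: rest)

-- Nat-indexed version of B's break/bounds computation
def breaksN (xs : List (Int × Int)) : List Nat :=
  (List.range' 1 (xs.length - 1)).filter (fun i =>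
    (xs.getD i (0, 0)).1 ≤ (xs.getD (i - 1) (0, 0)).1)

def tailB (xs : List (Int × Int)) : List Nat := breaksN xs ++ [xs.length]

def bNat (xs : List (Int × Int)) : List (List (Int × Int)) :=
  if xs = [] then []
  else ((0 :: tailB xs).zip (tailB xs)).map (fun ab => (xs.drop ab.1).take (ab.2 - ab.1))

-- ---- A-side ----
lemma goA_prefix (rest : List (Int × Int)) :
    ∀ runs cur, goA runs cur rest = runs ++ goA [] cur rest := by
  induction rest with
  | nil => intro runs cur; simp [goA]
  | cons p rest ih =>
    intro runs cur
    simp only [goA]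
    split_ifs with h
    · rw [ih runs, ih []]
    · rw [ih (runs ++ [cur]), ih ([] ++ [cur])]; simp

lemma runsOf_head (p : Int × Int) (rest : List (Int × Int)) :
    ∃ t r, runsOf (p :: rest) = (p :: t) :: r := by
  cases rest with
  | nil => exact ⟨[], [], rfl⟩
  | cons q rest' =>
    simp only [runsOf]
    split_ifs with h
    · obtain ⟨t, r, hr⟩ := runsOf_head q rest'
      rw [hr]; exact ⟨q :: t, r, rfl⟩
    · exact ⟨[], runsOf (q :: rest'), rfl⟩

def consFront (cur : List (Int × Int)) (ls : List (List (Int × Int))) : List (List (Int × Int)) :=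
  match ls with
  | (_ :: xs) :: r => (cur ++ xs) :: r
  | _ => cur :: ls

lemma goA_runsOf (rest : List (Int × Int)) :
    ∀ (cur : List (Int × Int)) (l : Int × Int), cur.getLast? = some l →
      goA [] cur rest = consFront cur (runsOf (l :: rest)) := by
  induction rest with
  | nil => intro cur l h; simp [goA, runsOf, consFront]
  | cons p rest ih =>
    intro cur l h
    simp only [goA, h, Option.getD_some]
    split_ifs with hc
    · have h1 : (cur ++ [p]).getLast? = some p := by simp
      rw [ih (cur ++ [p]) p h1]
      obtain ⟨t, r, hr⟩ := runsOf_head p rest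
      have : runsOf (l :: p :: rest) = consHead l (runsOf (p :: rest)) := by
        simp [runsOf, hc]
      rw [this, hr]
      simp [consHead, consFront]
    · rw [goA_prefix, ih [p] p (by simp)]
      obtain ⟨t, r, hr⟩ := runsOf_head p rest
      have : runsOf (l :: p :: rest) = [l] :: runsOf (p :: rest) := by
        simp [runsOf]; omega
      rw [this, hr]
      simp [consFront]

lemma detect_runs_eq_runsOf (xs : List (Int × Int)) : detect_runs xs = runsOf xs := by
  cases xs with
  | nil => rfl
  | cons p rest =>
    have := goA_runsOf rest [p] p (by simp)
    simp only [detect_runs, this]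
    obtain ⟨t, r, hr⟩ := runsOf_head p rest
    rw [hr]; simp [consFront]

-- ---- B-side: port B equals bNat, bNat equals runsOf ----
lemma breaks_int_eq (xs : List (Int × Int)) :
    (PySem.List.pyRange 1 (xs.length : Int) 1).filter (fun i =>
      (PySem.List.pyGetD xs i (0, 0)).1 ≤ (PySem.List.pyGetD xs (i - 1) (0, 0)).1)
    = (breaksN xs).map (fun i => Int.ofNat i) := by
  have hm : (((xs.length : Int)) - 1).toNat = xs.length - 1 := by omega
  have hpred : ∀ k ∈ List.range (xs.length - 1),
      ((fun i => decide ((PySem.List.pyGetD xs i (0,0)).1 ≤ (PySem.List.pyGetD xs (i-1) (0,0)).1))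
        ∘ (fun k : Nat => (1 : Int) + (k : Int))) k
      = ((fun i => decide ((xs.getD i (0,0)).1 ≤ (xs.getD (i-1) (0,0)).1)) ∘ (fun x : Nat => 1 + x)) k := by
    intro k _
    have h1 : (1 : Int) + (k : Int) = ((1 + k : Nat) : Int) := by push_cast; ring
    simp only [Function.comp_apply, h1, PySem.List.pyGetD_natCast]
    norm_num
  rw [PySem.List.pyRange_one, List.filter_map, hm, List.filter_congr hpred]
  rw [breaksN, List.range'_eq_map_range, List.filter_map, List.map_map]
  congr 1

lemma alt_eq_bNat (xs : List (Int × Int)) : detect_runs_alt xs = bNat xs := by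
  rw [detect_runs_alt, bNat]
  split_ifs with h
  · rfl
  simp only []
  rw [breaks_int_eq]
  have hbounds : (0 : Int) :: (breaksN xs).map (fun i => Int.ofNat i) ++ [(xs.length : Int)]
      = (0 :: tailB xs).map (fun i => Int.ofNat i) := by
    simp [tailB]
  rw [hbounds]
  have hdrop : PySem.List.slice ((0 :: tailB xs).map (fun i => Int.ofNat i)) (some 1) none
      = (tailB xs).map (fun i => Int.ofNat i) := by
    have := PySem.List.slice_from (xs := (0 :: tailB xs).map (fun i => Int.ofNat i)) (a := 1) (by norm_num)
    simpa using this
  rw [hdrop, List.zip_map, List.map_map]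
  apply List.map_congr_left
  intro ab _
  simp only [Function.comp_apply, Prod.map]
  rw [PySem.List.slice_toNat xs (by exact Int.natCast_nonneg ab.1) (by exact Int.natCast_nonneg ab.2)]
  simp

lemma breaksN_cons (p : Int × Int) (xs : List (Int × Int)) (h : xs ≠ []) :
    breaksN (p :: xs) =
      (if (xs.getD 0 (0, 0)).1 ≤ p.1 then [1] else []) ++ (breaksN xs).map (· + 1) := by
  have hlen : (p :: xs).length - 1 = (xs.length - 1) + 1 := by
    have := List.length_pos_iff.mpr h; simp; omega
  rw [breaksN, hlen, List.range'_succ]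
  rw [List.filter_cons]
  have hshift : List.range' 2 (xs.length - 1) = (List.range' 1 (xs.length - 1)).map (· + 1) := by
    rw [List.range'_eq_map_range, List.range'_eq_map_range, List.map_map]
    congr 1; funext k; simp; omega
  have hc1 : (decide (((p :: xs).getD 1 (0,0)).1 ≤ ((p :: xs).getD (1-1) (0,0)).1))
      = decide ((xs.getD 0 (0,0)).1 ≤ p.1) := by simp
  rw [hshift, List.filter_map,
      List.filter_congr (show ∀ i ∈ List.range' 1 (xs.length - 1),
        ((fun i => decide (((p :: xs).getD i (0,0)).1 ≤ ((p :: xs).getD (i-1) (0,0)).1)) ∘ (· + 1)) i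
        = (fun i => decide ((xs.getD i (0,0)).1 ≤ (xs.getD (i-1) (0,0)).1)) i from ?_)]
  · rw [hc1]
    simp only [breaksN]
    split_ifs with h1 h2 h3
    · rfl
    · exact absurd (of_decide_eq_true h1) h2
    · exact absurd (decide_eq_true h3) h1
    · simp
  · intro i hi
    have h1 : 1 ≤ i := (List.mem_range'_1.mp hi).1
    obtain ⟨j, hj⟩ : ∃ j, i = j + 1 := ⟨i - 1, by omega⟩
    subst hj
    simp only [Function.comp_apply]
    have e1 : (p :: xs).getD (j + 1 + 1) (0,0) = xs.getD (j + 1) (0,0) := by simp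
    have e2 : (p :: xs).getD (j + 1 + 1 - 1) (0,0) = xs.getD (j + 1 - 1) (0,0) := by simp
    rw [e1, e2]

lemma tailB_ne (xs : List (Int × Int)) : tailB xs ≠ [] := by simp [tailB]

lemma tailB_head_pos (xs : List (Int × Int)) (h : xs ≠ []) (t0 : Nat) (T' : List Nat)
    (hT : tailB xs = t0 :: T') : 1 ≤ t0 := by
  rw [tailB] at hT
  cases hB : breaksN xs with
  | nil =>
    rw [hB] at hT
    have hlen := List.length_pos_iff.mpr h
    simp at hT
    omega
  | cons b bs =>
    rw [hB] at hT
    have hb : b ∈ breaksN xs := by rw [hB]; exact List.mem_cons_self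
    have hmem := List.mem_filter.mp (by rw [breaksN] at hb; exact hb)
    have h1 := (List.mem_range'_1.mp hmem.1).1
    simp at hT
    omega

lemma tailB_cons (p : Int × Int) (xs : List (Int × Int)) (h : xs ≠ []) :
    tailB (p :: xs) =
      (if (xs.getD 0 (0, 0)).1 ≤ p.1 then [1] else []) ++ (tailB xs).map (· + 1) := by
  rw [tailB, breaksN_cons p xs h, tailB]
  simp [List.length_cons]

lemma bNat_cons_break (p : Int × Int) (xs : List (Int × Int)) (h : xs ≠ [])
    (hb : (xs.getD 0 (0, 0)).1 ≤ p.1) : bNat (p :: xs) = [p] :: bNat xs := by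
  rw [bNat, bNat, if_neg (by simp), if_neg h, tailB_cons p xs h, if_pos hb]
  have hm : (1 : Nat) :: (tailB xs).map (· + 1) = ((0 :: tailB xs)).map (· + 1) := by simp
  simp only [List.cons_append, List.nil_append]
  rw [List.zip_cons_cons, List.map_cons, hm, List.zip_map, List.map_map]
  congr 1
  apply List.map_congr_left
  intro ab _
  simp [Nat.add_sub_add_right]

lemma bNat_cons_nobreak (p : Int × Int) (xs : List (Int × Int)) (h : xs ≠ [])
    (hb : ¬ (xs.getD 0 (0, 0)).1 ≤ p.1) : bNat (p :: xs) = consHead p (bNat xs) := by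
  obtain ⟨t0, T', hT⟩ : ∃ t0 T', tailB xs = t0 :: T' := by
    cases hT : tailB xs with
    | nil => exact absurd hT (tailB_ne xs)
    | cons a b => exact ⟨a, b, rfl⟩
  have ht0 : 1 ≤ t0 := tailB_head_pos xs h t0 T' hT
  obtain ⟨y, ys, hxs⟩ : ∃ y ys, xs = y :: ys := by
    cases xs with | nil => exact absurd rfl h | cons a b => exact ⟨a, b, rfl⟩
  obtain ⟨k, hk⟩ : ∃ k, t0 = k + 1 := ⟨t0 - 1, by omega⟩
  rw [bNat, bNat, if_neg (by simp), if_neg h, tailB_cons p xs h, if_neg hb, List.nil_append, hT]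
  simp only [List.map_cons, List.zip_cons_cons, List.map_cons]
  rw [show ((t0 + 1) :: List.map (· + 1) T') = List.map (· + 1) (t0 :: T') from by simp]
  rw [List.zip_map, List.map_map]
  have hrest : List.map ((fun ab => List.take (ab.2 - ab.1) (List.drop ab.1 (p :: xs))) ∘ Prod.map (· + 1) (· + 1))
      ((t0 :: T').zip T')
      = List.map (fun ab => List.take (ab.2 - ab.1) (List.drop ab.1 xs)) ((t0 :: T').zip T') := by
    apply List.map_congr_left
    intro ab _
    simp [Nat.add_sub_add_right]
  rw [hrest]
  have hfirstL : List.take (t0 + 1 - 0) (List.drop 0 (p :: xs)) = p :: (y :: ys.take k) := by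
    subst hxs; simp [hk]
  have hfirstR : List.take (t0 - 0) (List.drop 0 xs) = y :: ys.take k := by
    subst hxs; simp [hk]
  rw [hfirstL, hfirstR]
  rfl

lemma bNat_eq_runsOf (xs : List (Int × Int)) : bNat xs = runsOf xs := by
  match xs with
  | [] => rfl
  | [p] => simp [bNat, tailB, breaksN, runsOf]
  | p :: q :: rest =>
    have h : (q :: rest : List (Int × Int)) ≠ [] := by simp
    have hget : ((q :: rest).getD 0 ((0 : Int), (0 : Int))) = q := rfl
    rw [runsOf]
    split_ifs with hc
    · rw [bNat_cons_nobreak p (q :: rest) h (by rw [hget]; omega)]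
      rw [bNat_eq_runsOf (q :: rest)]
    · rw [bNat_cons_break p (q :: rest) h (by rw [hget]; omega)]
      rw [bNat_eq_runsOf (q :: rest)]

-- ===== VERDICT (by name: the statement is the Claim_ definition above) =====
theorem detect_runs_spec : Claim_equal_detect_runs := by
  intro positions _
  unfold Spec_detect_runs
  rw [detect_runs_eq_runsOf, alt_eq_bNat, bNat_eq_runsOf]
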